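-- pv_equiv track=rewrite | github.com/lqm181/Building-a-Text-Model | Helper_Functions.py | generate_sens
-- ===== SOURCE A (Python) =====
-- def generate_sens(txt):
--     """ input: txt is a string of text
--         returns a list of lists in which each sublist is a list of strings
--         the number of sublists (length of the list) is the number of paragraphs of txt
--         the length of each sublist is the number of sentences in the corresponding paragraph of txt
--     """
--     pars = txt.splitlines() # generate a list of paragraphs of txt
--     sentences = []
--     s = ''
--
--     for i in range(len(pars)):
--         word_list = pars[i].split() # generate a list of all the words of a paragraph
--         sentences += [[]]
--         for j in range(len(word_list)): # for each word in word_list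
--             if word_list[j][-1] in '.?!' or j == len(word_list) - 1: # if the word has an ending-punctuation or it is the last word in the paragraph
--                 s += word_list[j]
--                 sentences[i] += [s] # store the sentence into the i_th list of the "superlist" sentences
--                 s = ''
--             else:
--                 s += word_list[j]
--                 s += ' '
--     return sentences
-- ===== SOURCE B (Python) =====
-- def _line_sentences(line):
--     words = line.split()
--     bounds = [j for j, w in enumerate(words) if w[-1] in '.?!']
--     sens = []
--     start = 0
--     for b in bounds:
--         sens.append(' '.join(words[start:b + 1]))
--         start = b + 1
--     if start < len(words):
--         sens.append(' '.join(words[start:]))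
--     return sens
--
-- def generate_sens(txt):
--     return [_line_sentences(line) for line in txt.splitlines()]
-- ===== Notes on version B (the rewrite author's own statement) =====
-- stated objective: alternative
-- what changed: Instead of A's single char-accumulating pass (building each sentence string incrementally with a carried accumulator), B first computes the list of boundary word-indices per line and then builds each sentence by slicing the word list between successive boundaries and space-joining the slice, with a final join for any trailing words.
import Mathlib
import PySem

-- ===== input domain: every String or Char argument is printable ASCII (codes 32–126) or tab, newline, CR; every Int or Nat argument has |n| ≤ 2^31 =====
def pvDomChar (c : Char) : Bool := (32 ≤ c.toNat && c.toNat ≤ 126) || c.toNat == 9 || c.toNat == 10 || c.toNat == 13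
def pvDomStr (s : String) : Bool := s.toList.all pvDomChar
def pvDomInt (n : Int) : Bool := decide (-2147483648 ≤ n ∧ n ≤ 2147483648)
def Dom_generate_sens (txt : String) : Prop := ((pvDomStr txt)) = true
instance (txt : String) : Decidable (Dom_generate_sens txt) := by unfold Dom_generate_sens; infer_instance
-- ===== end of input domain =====

-- B re-groups each line by precomputed sentence-boundary indices and slice-joins, instead of A's
-- carried character accumulator; same O(n) cost, different decomposition (objective: alternative).

-- ===== PORT A =====
-- `word[-1] in '.?!'` (this very expression occurs in both Python sources); the `none` branch is
-- Python's IndexError on an empty string, unreachable here because split() yields no empty word.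
def endsPunct (w : String) : Bool :=
  match PySem.Str.pyGet? w (-1) with
  | some c => ['.', '?', '!'].contains c
  | none => false

-- body of `for j in range(len(word_list))`: state = (sentences of this paragraph, pending chars s);
-- `s += word` is ported exactly on code points (List Char), the finished sentence wrapped by String.ofList.
def stepInnerA (wl : List String) (st : List String × List Char) (j : Int) : List String × List Char :=
  let w := PySem.List.pyGetD wl j ""
  if endsPunct w || (j == (wl.length : Int) - 1) then
    (st.1 ++ [String.ofList (st.2 ++ w.toList)], [])
  else
    (st.1, st.2 ++ w.toList ++ [' '])

-- body of `for i in range(len(pars))`: state = (sentences so far, pending chars s, carried across paragraphs)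
def stepOuterA (pars : List String) (st : List (List String) × List Char) (i : Int) : List (List String) × List Char :=
  let wl := PySem.Str.split₀ (PySem.List.pyGetD pars i "")
  let inner := (PySem.List.pyRange 0 (wl.length : Int) 1).foldl (stepInnerA wl) ([], st.2)
  (st.1 ++ [inner.1], inner.2)

def generate_sens (txt : String) : List (List String) :=
  let pars := PySem.Str.splitlines txt
  ((PySem.List.pyRange 0 (pars.length : Int) 1).foldl (stepOuterA pars) ([], [])).1

-- ===== PORT B =====
def line_sentences (line : String) : List String :=
  let words := PySem.Str.split₀ line
  let bounds := (PySem.List.enumerate words 0).filterMap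
    (fun p => if endsPunct p.2 then some p.1 else none)
  let st := bounds.foldl
    (fun (st : List String × Int) b =>
      (st.1 ++ [PySem.Str.join " " (PySem.List.slice words (some st.2) (some (b + 1)))], b + 1))
    ([], 0)
  if st.2 < (words.length : Int) then
    st.1 ++ [PySem.Str.join " " (PySem.List.slice words (some st.2) none)]
  else
    st.1

def generate_sens_alt (txt : String) : List (List String) :=
  (PySem.Str.splitlines txt).map line_sentences

-- ===== PRECONDITION & SPEC =====
def Spec_generate_sens (txt : String) (out : List (List String)) : Prop := out = generate_sens_alt txt
instance (txt : String) (out : List (List String)) : Decidable (Spec_generate_sens txt out) := by unfold Spec_generate_sens; infer_instance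

-- ===== CLAIM (what is proved, stated in full; the proofs are below) =====
def Claim_equal_generate_sens : Prop := ∀ (txt : String), Dom_generate_sens txt → Spec_generate_sens txt (generate_sens txt)

-- ===== LEMMAS AND PROOFS =====

-- the pending characters of A's accumulator s after the words `acc` (each word followed by a space)
def pref (acc : List String) : List Char := (acc.map (fun v => v.toList ++ [' '])).flatten

-- the sentence string made of the word group g, words joined by single spaces
def sent (g : List String) : String :=
  String.ofList (PySem.Chars.join [' '] (g.map String.toList))

-- A's grouping of one paragraph's words into sentences (flush on punctuation or on the last word)
def groupsA : List String → List String → List (List String)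
  | _, [] => []
  | acc, w :: rest =>
    if endsPunct w || rest.isEmpty then (acc ++ [w]) :: groupsA [] rest
    else groupsA (acc ++ [w]) rest

-- one step of the structural (right-to-left) grouping
def gstep (w : String) (p : List (List String) × List String) : List (List String) × List String :=
  if endsPunct w then ([w] :: p.1, p.2)
  else
    match p.1 with
    | [] => ([], w :: p.2)
    | g :: gs => ((w :: g) :: gs, p.2)

-- complete punctuation-terminated groups, and trailing leftover words
def gsplit : List String → List (List String) × List String
  | [] => ([], [])
  | w :: rest => gstep w (gsplit rest)

-- the boundary indices of the words `l`, absolute from start index `s`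
def bndsI : List String → Int → List Int
  | [], _ => []
  | w :: rest, s => (if endsPunct w then [s] else []) ++ bndsI rest (s + 1)

def attachP (p : List String) : List (List String) → List (List String)
  | [] => []
  | g :: gs => (p ++ g) :: gs

lemma attachP_nil (gs : List (List String)) : attachP [] gs = gs := by
  cases gs <;> simp [attachP]

lemma gsplit_fst_nil : ∀ t : List String, (gsplit t).1 = [] → (gsplit t).2 = t := by
  intro t
  induction t with
  | nil => intro _; rfl
  | cons w rest ih =>
    by_cases hb : endsPunct w = true
    · simp [gsplit, gstep, hb]
    · cases hg : (gsplit rest).1 with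
      | nil => simp [gsplit, gstep, hb, hg, ih hg]
      | cons g gs => simp [gsplit, gstep, hb, hg]

lemma gsplit_suffix : ∀ t : List String, (gsplit t).2 <:+ t := by
  intro t
  induction t with
  | nil => simp [gsplit]
  | cons w rest ih =>
    by_cases hb : endsPunct w = true
    · simpa [gsplit, gstep, hb] using ih.trans (List.suffix_cons w rest)
    · cases hg : (gsplit rest).1 with
      | nil =>
        have h2 := gsplit_fst_nil rest hg
        simp [gsplit, gstep, hb, hg, h2]
      | cons g gs =>
        simpa [gsplit, gstep, hb, hg] using ih.trans (List.suffix_cons w rest)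

lemma pref_nil : pref [] = [] := rfl

lemma pref_snoc (acc : List String) (w : String) :
    pref (acc ++ [w]) = pref acc ++ (w.toList ++ [' ']) := by
  simp [pref]

lemma joinSp_snoc : ∀ (acc : List String) (w : String),
    PySem.Chars.join [' '] ((acc ++ [w]).map String.toList) = pref acc ++ w.toList := by
  intro acc
  induction acc with
  | nil => intro w; simp [PySem.Chars.join_singleton, pref]
  | cons a acc ih =>
    intro w
    have h1 : ((a :: acc) ++ [w]).map String.toList
        = a.toList :: (acc ++ [w]).map String.toList := by simp
    cases hcc : (acc ++ [w]).map String.toList with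
    | nil => simp at hcc
    | cons q qs =>
      rw [h1, hcc, PySem.Chars.join_cons_cons, ← hcc, ih]
      simp [pref]

lemma sent_snoc (acc : List String) (w : String) :
    sent (acc ++ [w]) = String.ofList (pref acc ++ w.toList) := by
  rw [sent, joinSp_snoc]

lemma sent_eq_join (g : List String) : PySem.Str.join " " g = sent g := rfl

lemma bnds_eq : ∀ (l : List String) (s : Int),
    (PySem.List.enumerate l s).filterMap (fun p => if endsPunct p.2 then some p.1 else none)
      = bndsI l s := by
  intro l
  induction l with
  | nil => intro s; simp [PySem.List.enumerate_nil, bndsI]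
  | cons w rest ih =>
    intro s
    by_cases hb : endsPunct w = true <;>
      simp [PySem.List.enumerate_cons, bndsI, hb, ih]

lemma groupsA_eq : ∀ (t : List String) (acc : List String),
    groupsA acc t
      = attachP acc ((gsplit t).1 ++ (if (gsplit t).2 = [] then [] else [(gsplit t).2])) := by
  intro t
  induction t with
  | nil => intro acc; simp [groupsA, gsplit, attachP]
  | cons w rest ih =>
    intro acc
    by_cases hb : endsPunct w = true
    · rw [show groupsA acc (w :: rest) = (acc ++ [w]) :: groupsA [] rest from by
        simp [groupsA, hb]]
      rw [ih [], attachP_nil]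
      simp [gsplit, gstep, hb, attachP]
    · by_cases hre : rest = []
      · subst hre
        rw [show groupsA acc (w :: []) = [acc ++ [w]] from by simp [groupsA, hb]]
        simp [gsplit, gstep, hb, attachP]
      · have hie : rest.isEmpty = false := by
          cases rest
          · exact absurd rfl hre
          · rfl
        rw [show groupsA acc (w :: rest) = groupsA (acc ++ [w]) rest from by
          simp [groupsA, hb, hie]]
        rw [ih (acc ++ [w])]
        cases hg : (gsplit rest).1 with
        | nil =>
          have hlo := gsplit_fst_nil rest hg
          simp [gsplit, gstep, hb, hg, hlo, attachP, hre]
        | cons g gs =>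
          simp [gsplit, gstep, hb, hg, attachP]

lemma innerA_eq (ws : List String) : ∀ (tail : List String) (j : Nat)
    (cur : List String) (acc : List String),
    j + tail.length = ws.length → tail = ws.drop j →
    (PySem.List.pyRange (j : Int) (ws.length : Int) 1).foldl (stepInnerA ws) (cur, pref acc)
      = (cur ++ (groupsA acc tail).map sent, if tail = [] then pref acc else []) := by
  intro tail
  induction tail with
  | nil =>
    intro j cur acc h1 h2
    have hj : j = ws.length := by simpa using h1
    rw [hj, PySem.List.pyRange_one_eq_nil (le_refl _)]
    simp [groupsA]
  | cons w rest ih =>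
    intro j cur acc h1 h2
    have h1' : j + (rest.length + 1) = ws.length := by simpa using h1
    have hjlt : (j : Int) < (ws.length : Int) := by
      have : j < ws.length := by omega
      exact_mod_cast this
    rw [PySem.List.pyRange_one_cons hjlt]
    have hget : ws[j]? = some w := by
      have h0 : (ws.drop j)[0]? = ws[j + 0]? := List.getElem?_drop
      rw [← h2] at h0
      simpa using h0.symm
    have hw : PySem.List.pyGetD ws (j : Int) "" = w := by
      rw [PySem.List.pyGetD_natCast, List.getD_eq_getElem?_getD, hget]
      rfl
    have hdrop : rest = ws.drop (j + 1) := by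
      have hdd : (ws.drop j).drop 1 = ws.drop (j + 1) := List.drop_drop
      rw [← hdd, ← h2]
      rfl
    have hcast : ((j : Int) + 1) = ((j + 1 : Nat) : Int) := by push_cast; ring
    simp only [List.foldl_cons]
    by_cases hfl : (endsPunct w = true ∨ rest = [])
    · have hcond : (endsPunct w || ((j : Int) == (ws.length : Int) - 1)) = true := by
        rcases hfl with h | h
        · simp [h]
        · subst h
          have : (j : Int) = (ws.length : Int) - 1 := by
            simp at h1'
            omega
          simp [this]
      have hstep : stepInnerA ws (cur, pref acc) (j : Int)
          = (cur ++ [sent (acc ++ [w])], pref []) := by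
        simp [stepInnerA, hw, hcond, sent_snoc, pref_nil]
      rw [hstep, hcast, ih (j + 1) (cur ++ [sent (acc ++ [w])]) [] (by omega) hdrop]
      have hgA : groupsA acc (w :: rest) = (acc ++ [w]) :: groupsA [] rest := by
        rcases hfl with h | h
        · simp [groupsA, h]
        · simp [groupsA, h]
      rw [hgA]
      cases rest with
      | nil => simp [pref]
      | cons r rs => simp
    · obtain ⟨hb, hre⟩ := not_or.mp hfl
      have hbf : endsPunct w = false := by simpa using hb
      have hjne : ((j : Int) == (ws.length : Int) - 1) = false := by
        rw [beq_eq_false_iff_ne]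
        have hlen : 1 ≤ rest.length := by
          cases rest
          · exact absurd rfl hre
          · simp
        intro hc
        omega
      have hstep : stepInnerA ws (cur, pref acc) (j : Int) = (cur, pref (acc ++ [w])) := by
        simp [stepInnerA, hw, hbf, hjne, pref_snoc]
      rw [hstep, hcast, ih (j + 1) cur (acc ++ [w]) (by omega) hdrop]
      have hgA : groupsA acc (w :: rest) = groupsA (acc ++ [w]) rest := by
        have : rest.isEmpty = false := by
          cases rest
          · exact absurd rfl hre
          · rfl
        simp [groupsA, hbf, this]
      rw [hgA]
      cases rest with
      | nil => exact absurd rfl hre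
      | cons r rs => simp

lemma foldB_eq (ws : List String) : ∀ (tail : List String) (pos sstart : Nat)
    (sens : List String),
    pos + tail.length = ws.length → tail = ws.drop pos → sstart ≤ pos →
    (bndsI tail (pos : Int)).foldl
        (fun (st : List String × Int) b =>
          (st.1 ++ [PySem.Str.join " " (PySem.List.slice ws (some st.2) (some (b + 1)))], b + 1))
        (sens, (sstart : Int))
      = (sens ++ (attachP ((ws.take pos).drop sstart) (gsplit tail).1).map sent,
         if (gsplit tail).1 = [] then (sstart : Int)
         else ((ws.length - (gsplit tail).2.length : Nat) : Int)) := by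
  intro tail
  induction tail with
  | nil =>
    intro pos sstart sens h1 h2 h3
    simp [bndsI, gsplit, attachP]
  | cons w rest ih =>
    intro pos sstart sens h1 h2 h3
    have h1' : pos + (rest.length + 1) = ws.length := by simpa using h1
    have hget : ws[pos]? = some w := by
      have h0 : (ws.drop pos)[0]? = ws[pos + 0]? := List.getElem?_drop
      rw [← h2] at h0
      simpa using h0.symm
    have hdrop : rest = ws.drop (pos + 1) := by
      have hdd : (ws.drop pos).drop 1 = ws.drop (pos + 1) := List.drop_drop
      rw [← hdd, ← h2]
      rfl
    have htake : ws.take (pos + 1) = ws.take pos ++ [w] := by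
      rw [List.take_add_one, hget]
      rfl
    have hlentake : (ws.take pos).length = pos := by
      simp [List.length_take]
      omega
    have hpend : ∀ k : Nat, k ≤ pos →
        (ws.take (pos + 1)).drop k = (ws.take pos).drop k ++ [w] := by
      intro k hk
      rw [htake, List.drop_append_of_le_length (by omega)]
    have hcast : ((pos : Int) + 1) = ((pos + 1 : Nat) : Int) := by push_cast; ring
    by_cases hb : endsPunct w = true
    · rw [show bndsI (w :: rest) (pos : Int) = (pos : Int) :: bndsI rest ((pos : Int) + 1) from by
        simp [bndsI, hb]]
      simp only [List.foldl_cons]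
      have hslice : PySem.List.slice ws (some (sstart : Int)) (some ((pos : Int) + 1))
          = (ws.take (pos + 1)).drop sstart := by
        rw [hcast, PySem.List.slice_natCast, List.drop_take]
      rw [hslice, hpend sstart h3, sent_eq_join, hcast,
        ih (pos + 1) (pos + 1) _ (by omega) hdrop (le_refl _)]
      have hpend' : (ws.take (pos + 1)).drop (pos + 1) = [] := by
        apply List.drop_eq_nil_of_le
        simp [List.length_take]
      rw [hpend', attachP_nil]
      cases hg : (gsplit rest).1 with
      | nil =>
        have hlo := gsplit_fst_nil rest hg
        have hn : pos + 1 = ws.length - rest.length := by omega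
        simp [gsplit, gstep, hb, hg, hlo, attachP, hn]
      | cons g gs =>
        simp [gsplit, gstep, hb, hg, attachP]
    · rw [show bndsI (w :: rest) (pos : Int) = bndsI rest ((pos : Int) + 1) from by
        simp [bndsI, hb]]
      rw [hcast, ih (pos + 1) sstart sens (by omega) hdrop (by omega)]
      rw [hpend sstart h3]
      cases hg : (gsplit rest).1 with
      | nil =>
        simp [gsplit, gstep, hb, hg, attachP]
      | cons g gs =>
        simp [gsplit, gstep, hb, hg, attachP]

lemma line_eq (line : String) :
    line_sentences line = (groupsA [] (PySem.Str.split₀ line)).map sent := by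
  simp only [line_sentences]
  rw [bnds_eq]
  rw [show ((0 : Int) : Int) = ((0 : Nat) : Int) from by simp] at *
  generalize PySem.Str.split₀ line = words
  have H := foldB_eq words words 0 0 []
    (by simp) (by simp) (le_refl 0)
  simp only [List.take_zero, List.drop_nil, List.nil_append, attachP_nil] at H
  rw [H, groupsA_eq, attachP_nil]
  dsimp only
  cases hg : (gsplit words).1 with
  | nil =>
    have hlo := gsplit_fst_nil words hg
    rw [if_pos rfl]
    cases words with
    | nil => simp [gsplit]
    | cons a as =>
      have hpos : (((0 : Nat) : Int)) < (((a :: as).length : Nat) : Int) := by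
        exact_mod_cast Nat.succ_pos as.length
      rw [if_pos hpos, PySem.List.slice_from_natCast, sent_eq_join, hlo]
      simp
  | cons g gs =>
    rw [if_neg (List.cons_ne_nil g gs)]
    obtain ⟨pre, hpre⟩ := gsplit_suffix words
    have hlen2 : words.length = pre.length + (gsplit words).2.length := by
      conv_lhs => rw [← hpre]
      simp
    by_cases hlo : (gsplit words).2 = []
    · have hnn : ¬ ((((words.length - (gsplit words).2.length : Nat)) : Int)
          < ((words.length : Nat) : Int)) := by
        rw [hlo]
        simp
      rw [if_neg hnn, hlo]
      simp
    · have hlolen : 1 ≤ (gsplit words).2.length := by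
        cases hloc : (gsplit words).2
        · exact absurd hloc hlo
        · simp
      have hcond : (((words.length - (gsplit words).2.length : Nat)) : Int)
          < ((words.length : Nat) : Int) := by
        have : words.length - (gsplit words).2.length < words.length := by omega
        exact_mod_cast this
      rw [if_pos hcond, PySem.List.slice_from_natCast]
      have hdropx : words.drop (words.length - (gsplit words).2.length)
          = (gsplit words).2 := by
        have hplen : words.length - (gsplit words).2.length = pre.length := by omega
        rw [hplen]
        conv_lhs => rw [← hpre]
        exact List.drop_left
      rw [hdropx, sent_eq_join]
      simp [hlo]

-- proof-side name for the body of A's outer loop, as a function of the fetched line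
def fOuterA (st : List (List String) × List Char) (line : String) : List (List String) × List Char :=
  let wl := PySem.Str.split₀ line
  let inner := (PySem.List.pyRange 0 (wl.length : Int) 1).foldl (stepInnerA wl) ([], st.2)
  (st.1 ++ [inner.1], inner.2)

lemma stepOuterA_eq (pars : List String) :
    stepOuterA pars = fun st i => fOuterA st (PySem.List.pyGetD pars i "") := rfl

lemma outerA_eq : ∀ (pars : List String) (sens : List (List String)),
    pars.foldl fOuterA (sens, [])
      = (sens ++ pars.map (fun line => (groupsA [] (PySem.Str.split₀ line)).map sent), []) := by
  intro pars
  induction pars with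
  | nil => intro sens; simp
  | cons p ps ih =>
    intro sens
    have hinner := innerA_eq (PySem.Str.split₀ p) (PySem.Str.split₀ p) 0 [] []
      (by simp) (by simp)
    simp only [Nat.cast_zero, pref_nil] at hinner
    simp only [List.foldl_cons]
    rw [show fOuterA (sens, []) p
        = (sens ++ [(groupsA [] (PySem.Str.split₀ p)).map sent], []) from by
      simp only [fOuterA]
      rw [hinner]
      simp]
    rw [ih]
    simp

-- ===== VERDICT (by name: the statement is the Claim_ definition above) =====
theorem generate_sens_spec : Claim_equal_generate_sens := by
  intro txt _
  unfold Spec_generate_sens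
  simp only [generate_sens, generate_sens_alt]
  rw [stepOuterA_eq,
    PySem.List.foldl_pyRange_zero_pyGetD' (PySem.Str.splitlines txt) "" fOuterA ([], []),
    outerA_eq]
  simp [line_eq]
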